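-- pv_equiv track=rewrite | github.com/jschmidtnj/programming_examples | CS115/musicrecplus.py | most_likes
-- ===== SOURCE A (Python) =====
-- def most_likes(data):
--     """gets the user that likes the most artists"""
--     max_likes = 0
--     for key in data:
--         num_likes = len(data[key])
--         if num_likes >= max_likes:
--             max_likes = num_likes
--     most_likes_users = []
--     for key in data:
--         if key[-1] != "$":
--             num_likes = len(data[key])
--             if num_likes == max_likes:
--                 most_likes_users += [key]
--     return most_likes_users
-- ===== SOURCE B (Python) =====
-- def most_likes(data):
--     """gets the user that likes the most artists"""
--     global_max = 0
--     groups = {}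
--     for key in data:
--         n = len(data[key])
--         if n > global_max:
--             global_max = n
--         if not key.endswith("$"):
--             groups.setdefault(n, []).append(key)
--     return groups.get(global_max, [])
-- ===== Notes on version B (the rewrite author's own statement) =====
-- stated objective: alternative
-- what changed: Single pass maintaining the running maximum and a count-to-keys index dict, finished by one dict lookup, instead of A's two full scans (find max, then equality-filter).
-- outside the precondition, e.g. on most_likes({'': ['x']}): A raises IndexError, B returns ['']
import Mathlib
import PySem

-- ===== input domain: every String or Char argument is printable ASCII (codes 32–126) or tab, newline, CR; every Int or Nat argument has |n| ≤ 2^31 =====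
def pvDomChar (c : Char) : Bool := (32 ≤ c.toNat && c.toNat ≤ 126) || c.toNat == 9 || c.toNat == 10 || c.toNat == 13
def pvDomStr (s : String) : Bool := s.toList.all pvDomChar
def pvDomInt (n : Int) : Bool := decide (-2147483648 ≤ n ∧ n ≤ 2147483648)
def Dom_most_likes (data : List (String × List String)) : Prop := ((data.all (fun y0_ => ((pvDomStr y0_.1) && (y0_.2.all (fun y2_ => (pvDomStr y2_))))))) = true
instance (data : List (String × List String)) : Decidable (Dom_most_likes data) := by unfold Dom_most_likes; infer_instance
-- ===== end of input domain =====

-- B replaces A's two scans (find max, then equality-filter) by one pass keeping the running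
-- maximum and a count→keys index dict, finished by a single lookup; same O(n) cost.

-- ===== PORT A =====
-- key[-1]: Pre_ guarantees keys are nonempty, so pyGet? is always `some`; getD '$' only fills
-- the (excluded) IndexError case of Python's key[-1].
def most_likes (data : List (String × List String)) : List String :=
  let max_likes : Int :=
    data.foldl (fun max_likes kv =>
      let num_likes : Int := (kv.2.length : Int)
      if num_likes ≥ max_likes then num_likes else max_likes) 0
  data.foldl (fun most_likes_users kv =>
    if (PySem.Str.pyGet? kv.1 (-1)).getD '$' ≠ '$' then
      (let num_likes : Int := (kv.2.length : Int)
       if num_likes = max_likes then most_likes_users ++ [kv.1] else most_likes_users)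
    else most_likes_users) []

-- ===== PORT B =====
def most_likes_alt (data : List (String × List String)) : List String :=
  let st :=
    data.foldl (fun (st : Int × PySem.Dict Int (List String)) kv =>
      let n : Int := (kv.2.length : Int)
      let global_max := if n > st.1 then n else st.1
      let groups := if PySem.Str.endswith kv.1 "$" then st.2
                    else st.2.modify n [] (fun l => l ++ [kv.1])
      (global_max, groups)) ((0 : Int), PySem.Dict.empty)
  st.2.getD st.1 []

-- ===== PRECONDITION & SPEC =====
-- Pre_ excludes dicts with an empty-string key (A raises IndexError at key[-1]) and association
-- lists with duplicate keys (a Python dict cannot contain them, so such lists do not represent a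
-- dict input; A happens to return a value on the collapsed dict).
def Pre_most_likes (data : List (String × List String)) : Prop :=
  (data.map Prod.fst).Nodup ∧ ∀ kv ∈ data, kv.1 ≠ ""
instance (data : List (String × List String)) : Decidable (Pre_most_likes data) := by
  unfold Pre_most_likes; infer_instance
def pvWitness_most_likes : (List (String × List String)) :=
  [("a", ["x", "y"]), ("b$", ["x"]), ("c", [])]

def Spec_most_likes (data : List (String × List String)) (out : List String) : Prop := out = most_likes_alt data
instance (data : List (String × List String)) (out : List String) : Decidable (Spec_most_likes data out) := by unfold Spec_most_likes; infer_instance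

-- ===== CLAIM (what is proved, stated in full; the proofs are below) =====
def Claim_equal_most_likes : Prop := ∀ (data : List (String × List String)), Dom_most_likes data → Pre_most_likes data → Spec_most_likes data (most_likes data)
-- ===== LEMMAS AND PROOFS =====

-- for a nonempty string, endswith "$" tests exactly the last character
lemma chars_ends_dollar (cs : List Char) (h : cs ≠ []) :
    PySem.Chars.endswith cs ['$'] = ((PySem.List.pyGet? cs (-1)).getD '$' == '$') := by
  obtain ⟨l, a, rfl⟩ := (List.eq_nil_or_concat cs).resolve_left h
  rw [PySem.List.pyGet?_neg_one]
  simp only [List.concat_eq_append, List.getLast?_concat, Option.getD_some]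
  by_cases ha : a = '$'
  · subst ha
    simp only [beq_self_eq_true]
    exact (PySem.Chars.endswith_iff _ _).mpr ⟨l, rfl⟩
  · have hsuf : ¬ (['$'] <:+ l ++ [a]) := by
      rintro ⟨t, ht⟩
      have h2 := congrArg List.getLast? ht
      rw [List.getLast?_concat, List.getLast?_concat] at h2
      exact ha (by simpa using h2.symm)
    have hb : (a == '$') = false := by simpa using ha
    rw [hb]
    exact Bool.eq_false_iff.mpr (fun hbe => hsuf ((PySem.Chars.endswith_iff _ _).mp hbe))

lemma ends_dollar (k : String) (h : k ≠ "") :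
    PySem.Str.endswith k "$" = ((PySem.Str.pyGet? k (-1)).getD '$' == '$') := by
  have hl : k.toList ≠ [] := by
    intro hc
    apply h
    have := congrArg String.ofList hc
    simpa using this
  simpa using chars_ends_dollar k.toList hl

lemma max_fold_eq (xs : List (String × List String)) : ∀ m : Int,
    xs.foldl (fun a kv => if (kv.2.length : Int) ≥ a then (kv.2.length : Int) else a) m
      = xs.foldl (fun a kv => if (kv.2.length : Int) > a then (kv.2.length : Int) else a) m := by
  induction xs with
  | nil => intro m; rfl
  | cons kv xs ih =>
    intro m
    simp only [List.foldl_cons]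
    have : (if (kv.2.length : Int) ≥ m then (kv.2.length : Int) else m)
        = (if (kv.2.length : Int) > m then (kv.2.length : Int) else m) := by
      split_ifs <;> omega
    rw [this, ih]

lemma a_filter_eq (M : Int) (xs : List (String × List String))
    (hpre : ∀ kv ∈ xs, kv.1 ≠ "") : ∀ acc : List String,
    xs.foldl (fun acc kv =>
        if (PySem.Str.pyGet? kv.1 (-1)).getD '$' ≠ '$' then
          (if (kv.2.length : Int) = M then acc ++ [kv.1] else acc)
        else acc) acc
      = acc ++ (xs.filter
          (fun kv => !PySem.Str.endswith kv.1 "$" && ((kv.2.length : Int) == M))).map Prod.fst := by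
  induction xs with
  | nil => intro acc; simp
  | cons kv xs ih =>
    intro acc
    have hk : kv.1 ≠ "" := hpre kv (List.mem_cons_self ..)
    have ih' := ih (fun p hp => hpre p (List.mem_cons_of_mem _ hp))
    simp only [List.foldl_cons, List.filter_cons, ends_dollar kv.1 hk]
    by_cases hc : (PySem.Str.pyGet? kv.1 (-1)).getD '$' = '$'
    · simp only [hc, ne_eq, not_true_eq_false, if_false, beq_self_eq_true, Bool.not_true,
        Bool.false_and, Bool.false_eq_true, if_false]
      exact ih' acc
    · have hcb : ((PySem.Str.pyGet? kv.1 (-1)).getD '$' == '$') = false := by simpa using hc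
      by_cases hn : (kv.2.length : Int) = M
      · simp only [hc, hcb, hn, ne_eq, not_false_eq_true, if_true, Bool.not_false, Bool.true_and,
          beq_self_eq_true, if_true]
        rw [ih', List.append_assoc]
        simp
      · have hnb : ((kv.2.length : Int) == M) = false := by simpa using hn
        simp only [hc, hcb, hn, hnb, ne_eq, not_false_eq_true, if_true, Bool.not_false,
          Bool.true_and, if_false, Bool.false_eq_true]
        exact ih' acc

lemma b_fold_fst (xs : List (String × List String)) :
    ∀ (m : Int) (g : PySem.Dict Int (List String)),
    (xs.foldl (fun (st : Int × PySem.Dict Int (List String)) kv =>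
        ((if (kv.2.length : Int) > st.1 then (kv.2.length : Int) else st.1),
         (if PySem.Str.endswith kv.1 "$" then st.2
          else st.2.modify (kv.2.length : Int) [] (fun l => l ++ [kv.1])))) (m, g)).1
      = xs.foldl (fun a kv => if (kv.2.length : Int) > a then (kv.2.length : Int) else a) m := by
  induction xs with
  | nil => intro m g; rfl
  | cons kv xs ih =>
    intro m g
    simp only [List.foldl_cons]
    exact ih _ _

lemma b_fold_getD (xs : List (String × List String)) :
    ∀ (m c : Int) (g : PySem.Dict Int (List String)),
    (xs.foldl (fun (st : Int × PySem.Dict Int (List String)) kv =>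
        ((if (kv.2.length : Int) > st.1 then (kv.2.length : Int) else st.1),
         (if PySem.Str.endswith kv.1 "$" then st.2
          else st.2.modify (kv.2.length : Int) [] (fun l => l ++ [kv.1])))) (m, g)).2.getD c []
      = g.getD c [] ++ (xs.filter
          (fun kv => !PySem.Str.endswith kv.1 "$" && ((kv.2.length : Int) == c))).map Prod.fst := by
  induction xs with
  | nil => intro m c g; simp
  | cons kv xs ih =>
    intro m c g
    simp only [List.foldl_cons, List.filter_cons]
    by_cases he : PySem.Str.endswith kv.1 "$"
    · simp only [he, if_true, Bool.not_true, Bool.false_and, Bool.false_eq_true, if_false]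
      exact ih _ _ _
    · have heb : PySem.Str.endswith kv.1 "$" = false := by simpa using he
      rw [heb]
      simp only [Bool.not_false, Bool.true_and, Bool.false_eq_true, if_false]
      rw [ih]
      by_cases hn : (kv.2.length : Int) = c
      · have hb : ((kv.2.length : Int) == c) = true := by simpa using hn
        rw [hb]
        simp only [if_true, List.map_cons]
        rw [PySem.Dict.getD_modify, if_pos hn.symm, hn, List.append_assoc]
        simp
      · have hb : ((kv.2.length : Int) == c) = false := by simpa using hn
        rw [hb]
        simp only [Bool.false_eq_true, if_false]
        rw [PySem.Dict.getD_modify, if_neg (fun h => hn h.symm)]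

-- ===== VERDICT (by name: the statement is the Claim_ definition above) =====
theorem most_likes_spec : Claim_equal_most_likes := by
  intro data _ hpre
  unfold Spec_most_likes most_likes most_likes_alt
  rw [a_filter_eq _ _ hpre.2, max_fold_eq, b_fold_getD, b_fold_fst]
  simp [PySem.Dict.getD_empty]
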